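-- pv_equiv track=rewrite | github.com/sahithi-sss/Numerical-Optimization | Netwon_interpolation_mtds_1/newtons_backwd_diff.py | backward_diff_table
-- ===== SOURCE A (Python) =====
-- def backward_diff_table(Y):
--     n = len(Y)
--     B = [[0] * n for _ in range(n)]
--
--     for i in range(n):
--         B[i][0] = Y[i]
--
--     for j in range(1,n):
--         for i in range(n-1,j-1,-1):
--             B[i][j] = B[i][j-1] - B[i-1][j-1]
--
--     return [B[n-1][j] for j in range(n)]
-- ===== SOURCE B (Python) =====
-- def backward_diff_table(Y):
--     n = len(Y)
--     out = []
--     for j in range(n):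
--         s = 0
--         c = 1
--         for k in range(j + 1):
--             s += c * Y[n - 1 - k] if k % 2 == 0 else -c * Y[n - 1 - k]
--             c = c * (j - k) // (k + 1)
--         out.append(s)
--     return out
-- ===== Notes on version B (the rewrite author's own statement) =====
-- stated objective: alternative
-- what changed: B computes each output entry directly by the closed form sum_{k<=j} (-1)^k*C(j,k)*Y[n-1-k], maintaining the binomial coefficient multiplicatively, instead of filling A's n-by-n difference table by the recurrence and reading its last row.
import Mathlib
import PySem

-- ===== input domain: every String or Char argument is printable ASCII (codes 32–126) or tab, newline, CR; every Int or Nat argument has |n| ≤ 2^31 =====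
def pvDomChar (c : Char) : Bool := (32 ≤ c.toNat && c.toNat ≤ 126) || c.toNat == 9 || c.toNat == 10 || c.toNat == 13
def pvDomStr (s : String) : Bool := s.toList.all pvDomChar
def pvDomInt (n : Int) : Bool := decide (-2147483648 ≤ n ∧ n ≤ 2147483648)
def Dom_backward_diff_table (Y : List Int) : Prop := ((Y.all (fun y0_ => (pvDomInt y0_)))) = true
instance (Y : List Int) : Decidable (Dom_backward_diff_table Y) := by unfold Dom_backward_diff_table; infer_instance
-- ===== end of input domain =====

-- B replaces A's n×n backward-difference table by the closed form
-- out[j] = Σ_{k≤j} (-1)^k·C(j,k)·Y[n-1-k], the binomial coefficient kept multiplicatively.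

-- ===== PORT A =====
-- B[i][j] (reads in A; every read A performs is in range)
def bdtGet (B : List (List Int)) (i j : Int) : Int :=
  PySem.List.pyGetD (PySem.List.pyGetD B i []) j 0

-- B[i][j] = v (writes in A; every write A performs is in range)
def bdtSet (B : List (List Int)) (i j : Int) (v : Int) : List (List Int) :=
  PySem.List.pySetD B i (PySem.List.pySetD (PySem.List.pyGetD B i []) j v)

def backward_diff_table (Y : List Int) : List Int :=
  let n : Int := Y.length
  let B0 : List (List Int) :=
    (PySem.List.pyRange 0 n 1).map (fun _ => List.replicate n.toNat (0 : Int))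
  let B1 := (PySem.List.pyRange 0 n 1).foldl
    (fun B i => bdtSet B i 0 (PySem.List.pyGetD Y i 0)) B0
  let B2 := (PySem.List.pyRange 1 n 1).foldl
    (fun B j =>
      (PySem.List.pyRange (n - 1) (j - 1) (-1)).foldl
        (fun B i => bdtSet B i j (bdtGet B i (j - 1) - bdtGet B (i - 1) (j - 1))) B) B1
  (PySem.List.pyRange 0 n 1).map (fun j => bdtGet B2 (n - 1) j)

-- ===== PORT B =====
-- 'c * Y[n-1-k] if k % 2 == 0 else -c * Y[n-1-k]'
def bdtTerm (Y : List Int) (n c k : Int) : Int :=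
  if PySem.Int.mod k 2 = 0 then c * PySem.List.pyGetD Y (n - 1 - k) 0
  else -c * PySem.List.pyGetD Y (n - 1 - k) 0

def backward_diff_table_alt (Y : List Int) : List Int :=
  let n : Int := Y.length
  (PySem.List.pyRange 0 n 1).foldl
    (fun out j =>
      out ++ [((PySem.List.pyRange 0 (j + 1) 1).foldl
        (fun (st : Int × Int) k =>
          (st.1 + bdtTerm Y n st.2 k, PySem.Int.floordiv (st.2 * (j - k)) (k + 1)))
        (0, 1)).1])
    []

-- ===== PRECONDITION & SPEC =====
def Spec_backward_diff_table (Y : List Int) (out : List Int) : Prop := out = backward_diff_table_alt Y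
instance (Y : List Int) (out : List Int) : Decidable (Spec_backward_diff_table Y out) := by unfold Spec_backward_diff_table; infer_instance

-- ===== CLAIM (what is proved, stated in full; the proofs are below) =====
def Claim_equal_backward_diff_table : Prop := ∀ (Y : List Int), Dom_backward_diff_table Y → Spec_backward_diff_table Y (backward_diff_table Y)

-- ===== LEMMAS AND PROOFS =====

-- the j-th backward difference of Y ending at (integer) index i
def ddI (Y : List Int) : Nat → Int → Int
  | 0, i => PySem.List.pyGetD Y i 0
  | j + 1, i => ddI Y j i - ddI Y j (i - 1)

-- ---- A-side: the matrix as a table of in-range cells ----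

def bdtShape (B : List (List Int)) (n : Nat) : Prop :=
  B.length = n ∧ ∀ (k : Nat) (h : k < B.length), B[k].length = n

theorem bdtSet_eq (B : List (List Int)) (i j v : Int) (h0 : 0 ≤ i) (hi : i < B.length) :
    bdtSet B i j v = B.set i.toNat (PySem.List.pySetD (B[i.toNat]'(by omega)) j v) := by
  unfold bdtSet
  rw [PySem.List.pyGetD_eq_getElem _ _ h0 (by omega)]
  rw [PySem.List.pySetD_of_nonneg _ _ h0]

theorem bdtShape_set (B : List (List Int)) (n : Nat) (i j v : Int)
    (hB : bdtShape B n) (h0 : 0 ≤ i) (hi : i < (n : Int)) :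
    bdtShape (bdtSet B i j v) n := by
  obtain ⟨hl, hr⟩ := hB
  rw [bdtSet_eq B i j v h0 (by omega)]
  refine ⟨by simpa using hl, ?_⟩
  intro k hk
  simp only [List.length_set] at hk
  rw [List.getElem_set]
  split_ifs with h
  · rw [PySem.List.length_pySetD]; exact hr _ _
  · exact hr _ _

theorem bdtGet_bdtSet (B : List (List Int)) (n : Nat) (i j v i' j' : Int)
    (hB : bdtShape B n)
    (hi0 : 0 ≤ i) (hi : i < (n : Int)) (hj0 : 0 ≤ j) (hj : j < (n : Int))
    (hi'0 : 0 ≤ i') (hi' : i' < (n : Int)) (hj'0 : 0 ≤ j') :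
    bdtGet (bdtSet B i j v) i' j' = if i' = i ∧ j' = j then v else bdtGet B i' j' := by
  obtain ⟨hl, hr⟩ := hB
  rw [bdtSet_eq B i j v hi0 (by omega)]
  unfold bdtGet
  rw [PySem.List.pyGetD_eq_getElem _ _ hi'0 (by simp; omega)]
  rw [PySem.List.pyGetD_eq_getElem _ _ hi'0 (by omega)]
  rw [List.getElem_set]
  by_cases hii : i' = i
  · have : i.toNat = i'.toNat := by omega
    rw [if_pos (by omega)]
    have hjcast : j = ((j.toNat : Nat) : Int) := by omega
    have hj'cast : j' = ((j'.toNat : Nat) : Int) := by omega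
    rw [hjcast, hj'cast]
    rw [PySem.List.pyGetD_pySetD_natCast _ _ _ _ _ (by rw [hr]; omega)]
    by_cases hjj : j'.toNat = j.toNat
    · rw [if_pos hjj, if_pos ⟨hii, by omega⟩]
    · rw [if_neg hjj, if_neg (fun h => hjj (by omega))]
      simp [hii]
  · rw [if_neg (by omega)]
    rw [if_neg (by tauto)]

-- one column-filling fold: writes go to column jc, the written value f reads only other columns
theorem bdtFoldCol (n : Nat) (jc : Int) (hjc0 : 0 ≤ jc) (hjc : jc < (n : Int))
    (f : List (List Int) → Int → Int) (P : Int → Prop)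
    (hP : ∀ x, P x → 0 ≤ x ∧ x < (n : Int))
    (hf : ∀ B, bdtShape B n → ∀ iw v i, 0 ≤ iw → iw < (n : Int) → P i →
        f (bdtSet B iw jc v) i = f B i) :
    ∀ (is : List Int) (B), bdtShape B n → (∀ x ∈ is, P x) →
      bdtShape (is.foldl (fun B i => bdtSet B i jc (f B i)) B) n ∧
      ∀ i' j', 0 ≤ i' → i' < (n : Int) → 0 ≤ j' →
        bdtGet (is.foldl (fun B i => bdtSet B i jc (f B i)) B) i' j'
          = if j' = jc ∧ i' ∈ is then f B i' else bdtGet B i' j' := by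
  intro is
  induction is with
  | nil =>
    intro B hB _
    exact ⟨hB, by intro i' j' _ _ _; simp⟩
  | cons i is' ih =>
    intro B hB his
    obtain ⟨hi0, hin⟩ := hP i (his i List.mem_cons_self)
    have hBs : bdtShape (bdtSet B i jc (f B i)) n := bdtShape_set B n i jc (f B i) hB hi0 hin
    obtain ⟨ihS, ihG⟩ := ih (bdtSet B i jc (f B i)) hBs
      (fun x hx => his x (List.mem_cons_of_mem _ hx))
    refine ⟨ihS, ?_⟩
    intro i' j' h1 h2 h3
    simp only [List.foldl_cons]
    rw [ihG i' j' h1 h2 h3]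
    have hset := bdtGet_bdtSet B n i jc (f B i) i' j' hB hi0 hin hjc0 hjc h1 h2 h3
    by_cases hcol : j' = jc
    · by_cases hmem : i' ∈ is'
      · rw [if_pos ⟨hcol, hmem⟩, if_pos ⟨hcol, List.mem_cons_of_mem _ hmem⟩]
        exact hf B hB i (f B i) i' hi0 hin (his i' (List.mem_cons_of_mem _ hmem))
      · rw [if_neg (fun h => hmem h.2), hset]
        by_cases hieq : i' = i
        · rw [if_pos ⟨hieq, hcol⟩, if_pos ⟨hcol, by rw [hieq]; exact List.mem_cons_self⟩, hieq]
        · rw [if_neg (fun h => hieq h.1),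
            if_neg (fun h => by rcases List.mem_cons.mp h.2 with h' | h' <;> tauto)]
    · rw [if_neg (fun h => hcol h.1), hset, if_neg (fun h => hcol h.2),
        if_neg (fun h => hcol h.1)]

-- invariant after the outer loop has processed columns < m
def bdtInv (Y : List Int) (m : Int) (B : List (List Int)) : Prop :=
  bdtShape B Y.length ∧ ∀ c i', 0 ≤ c → c < m → c ≤ i' → i' < (Y.length : Int) →
    bdtGet B i' c = ddI Y c.toNat i'

theorem bdtInnerStep (Y : List Int) (a : Int) (h1 : 1 ≤ a) (h2 : a < (Y.length : Int))
    (B : List (List Int)) (hB : bdtInv Y a B) :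
    bdtInv Y (a + 1)
      ((PySem.List.pyRange ((Y.length : Int) - 1) (a - 1) (-1)).foldl
        (fun B i => bdtSet B i a (bdtGet B i (a - 1) - bdtGet B (i - 1) (a - 1))) B) := by
  obtain ⟨hS, hG⟩ := hB
  obtain ⟨hS', hG'⟩ := bdtFoldCol Y.length a (by omega) h2
    (fun B i => bdtGet B i (a - 1) - bdtGet B (i - 1) (a - 1))
    (fun x => a ≤ x ∧ x < (Y.length : Int))
    (fun x hx => ⟨by omega, hx.2⟩)
    (fun B hB iw v i hiw0 hiwn hi => by
      simp only []
      obtain ⟨hia, hin⟩ := hi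
      rw [bdtGet_bdtSet B Y.length iw a v i (a - 1) hB hiw0 hiwn (by omega) h2
          (by omega) (by omega) (by omega),
        bdtGet_bdtSet B Y.length iw a v (i - 1) (a - 1) hB hiw0 hiwn (by omega) h2
          (by omega) (by omega) (by omega)]
      rw [if_neg (fun h => by omega), if_neg (fun h => by omega)])
    (PySem.List.pyRange ((Y.length : Int) - 1) (a - 1) (-1)) B hS
    (fun x hx => by rw [PySem.List.mem_pyRange_neg_one] at hx; exact ⟨by omega, by omega⟩)
  refine ⟨hS', ?_⟩
  intro c i' hc0 hca hci hin
  rw [hG' i' c (by omega) hin hc0]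
  by_cases hceq : c = a
  · rw [if_pos ⟨hceq, by rw [PySem.List.mem_pyRange_neg_one]; omega⟩]
    rw [hG (a - 1) i' (by omega) (by omega) (by omega) hin,
      hG (a - 1) (i' - 1) (by omega) (by omega) (by omega) (by omega)]
    rw [hceq, show a.toNat = (a - 1).toNat + 1 by omega, ddI]
  · rw [if_neg (fun h => hceq h.1)]
    exact hG c i' hc0 (by omega) hci hin

theorem bdtOuter (Y : List Int) : ∀ (t : Nat) (a : Int), 1 ≤ a → a ≤ (Y.length : Int) →
    t = ((Y.length : Int) - a).toNat → ∀ B, bdtInv Y a B →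
    bdtInv Y (Y.length : Int)
      ((PySem.List.pyRange a (Y.length : Int) 1).foldl
        (fun B j =>
          (PySem.List.pyRange ((Y.length : Int) - 1) (j - 1) (-1)).foldl
            (fun B i => bdtSet B i j (bdtGet B i (j - 1) - bdtGet B (i - 1) (j - 1))) B) B) := by
  intro t
  induction t with
  | zero =>
    intro a ha1 ha2 ht B hB
    rw [PySem.List.pyRange_one_eq_nil (by omega)]
    rw [show (Y.length : Int) = a by omega]
    exact hB
  | succ t ih =>
    intro a ha1 ha2 ht B hB
    rw [PySem.List.pyRange_one_cons (by omega)]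
    simp only [List.foldl_cons]
    exact ih (a + 1) (by omega) (by omega) (by omega) _ (bdtInnerStep Y a ha1 (by omega) B hB)

theorem bdtInit (Y : List Int) (hY : Y ≠ []) :
    bdtInv Y 1
      ((PySem.List.pyRange 0 (Y.length : Int) 1).foldl
        (fun B i => bdtSet B i 0 (PySem.List.pyGetD Y i 0))
        ((PySem.List.pyRange 0 (Y.length : Int) 1).map
          (fun _ => List.replicate (Y.length : Int).toNat (0 : Int)))) := by
  have hlen : 0 < Y.length := List.length_pos_iff.mpr hY
  have hS0 : bdtShape ((PySem.List.pyRange 0 (Y.length : Int) 1).map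
      (fun _ => List.replicate (Y.length : Int).toNat (0 : Int))) Y.length := by
    constructor
    · simp [PySem.List.length_pyRange_one]
    · intro k hk
      simp only [List.getElem_map, List.length_replicate]
      omega
  obtain ⟨hS', hG'⟩ := bdtFoldCol Y.length 0 le_rfl (by omega)
    (fun _ i => PySem.List.pyGetD Y i 0)
    (fun x => 0 ≤ x ∧ x < (Y.length : Int))
    (fun x hx => hx)
    (fun B hB iw v i hiw0 hiwn hi => rfl)
    (PySem.List.pyRange 0 (Y.length : Int) 1) _ hS0
    (fun x hx => by rw [PySem.List.mem_pyRange_one] at hx; exact hx)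
  refine ⟨hS', ?_⟩
  intro c i' hc0 hc1 hci hin
  have hc : c = 0 := by omega
  subst hc
  rw [hG' i' 0 (by omega) hin le_rfl]
  rw [if_pos ⟨rfl, by rw [PySem.List.mem_pyRange_one]; omega⟩]
  rfl

theorem bdt_main : ∀ (Y : List Int),
    backward_diff_table Y
      = (PySem.List.pyRange 0 (Y.length : Int) 1).map
          (fun j => ddI Y j.toNat ((Y.length : Int) - 1)) := by
  intro Y
  simp only [backward_diff_table]
  by_cases hY : Y = []
  · subst hY; simp [PySem.List.pyRange_one_eq_nil]
  · have hlen : 0 < Y.length := List.length_pos_iff.mpr hY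
    obtain ⟨hS, hG⟩ := bdtOuter Y ((Y.length : Int) - 1).toNat 1 (by omega) (by omega)
      (by omega) _ (bdtInit Y hY)
    apply List.map_congr_left
    intro j hj
    rw [PySem.List.mem_pyRange_one] at hj
    exact hG j ((Y.length : Int) - 1) (by omega) (by omega) (by omega) (by omega)

-- ---- bridge: backward differences are alternating binomial sums (Pascal) ----

theorem ddI_eq_sum (Y : List Int) : ∀ (j : Nat) (i : Int),
    ddI Y j i
      = Finset.sum (Finset.range (j + 1))
          (fun k => (-1 : Int) ^ k * (j.choose k : Int) * PySem.List.pyGetD Y (i - k) 0) := by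
  intro j
  induction j with
  | zero =>
    intro i
    simp [ddI]
  | succ j ih =>
    intro i
    show ddI Y j i - ddI Y j (i - 1) = _
    rw [ih i, ih (i - 1)]
    rw [Finset.sum_range_succ' (n := j + 1)]
    have hshift : ∀ k : Nat, i - 1 - (k : Int) = i - ((k : Int) + 1) := by
      intro k; ring
    have hA : Finset.sum (Finset.range (j + 1))
        (fun k => (-1 : Int) ^ k * (j.choose k : Int) * PySem.List.pyGetD Y (i - k) 0)
        = Finset.sum (Finset.range j)
            (fun k => (-1 : Int) ^ (k + 1) * (j.choose (k + 1) : Int)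
              * PySem.List.pyGetD Y (i - ((k : Int) + 1)) 0)
          + PySem.List.pyGetD Y (i - 0) 0 := by
      rw [Finset.sum_range_succ' (n := j)]
      simp [Nat.cast_add]
    have hC : Finset.sum (Finset.range (j + 1))
        (fun k => (-1 : Int) ^ k * (j.choose (k + 1) : Int)
          * PySem.List.pyGetD Y (i - ((k : Int) + 1)) 0)
        = Finset.sum (Finset.range j)
            (fun k => (-1 : Int) ^ k * (j.choose (k + 1) : Int)
              * PySem.List.pyGetD Y (i - ((k : Int) + 1)) 0) := by
      rw [Finset.sum_range_succ]
      simp [Nat.choose_succ_self]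
    rw [hA]
    have hB' : Finset.sum (Finset.range (j + 1))
        (fun k => (-1 : Int) ^ k * (j.choose k : Int) * PySem.List.pyGetD Y (i - 1 - k) 0)
        = Finset.sum (Finset.range (j + 1))
            (fun k => (-1 : Int) ^ k * (j.choose k : Int)
              * PySem.List.pyGetD Y (i - ((k : Int) + 1)) 0) := by
      apply Finset.sum_congr rfl
      intro k _
      rw [hshift k]
    rw [hB']
    have hg : ∀ k : Nat, (-1 : Int) ^ (k + 1) * ((j + 1).choose (k + 1) : Int)
        * PySem.List.pyGetD Y (i - ((k : Int) + 1)) 0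
        = -((-1 : Int) ^ k * (j.choose k : Int) * PySem.List.pyGetD Y (i - ((k : Int) + 1)) 0)
          + -((-1 : Int) ^ k * (j.choose (k + 1) : Int)
              * PySem.List.pyGetD Y (i - ((k : Int) + 1)) 0) := by
      intro k
      rw [Nat.choose_succ_succ]
      push_cast
      ring
    have hgoalR : Finset.sum (Finset.range (j + 1))
        (fun k => (-1 : Int) ^ (k + 1) * ((j + 1).choose (k + 1) : Int)
          * PySem.List.pyGetD Y (i - (((k : Int)) + 1)) 0)
        = -Finset.sum (Finset.range (j + 1))
            (fun k => (-1 : Int) ^ k * (j.choose k : Int)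
              * PySem.List.pyGetD Y (i - ((k : Int) + 1)) 0)
          + -Finset.sum (Finset.range j)
            (fun k => (-1 : Int) ^ k * (j.choose (k + 1) : Int)
              * PySem.List.pyGetD Y (i - ((k : Int) + 1)) 0) := by
      rw [← hC]
      rw [← Finset.sum_neg_distrib, ← Finset.sum_neg_distrib, ← Finset.sum_add_distrib]
      apply Finset.sum_congr rfl
      intro k _
      rw [hg k]
    -- align the casts in the goal's shifted sum ((k+1 : Nat) : Int) = (k:Int)+1
    have hcast : ∀ k : Nat, i - ((k + 1 : Nat) : Int) = i - ((k : Int) + 1) := by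
      intro k; push_cast; ring
    simp only [Nat.cast_add, Nat.cast_one] at hgoalR ⊢
    rw [hgoalR]
    have h0 : ((j + 1).choose 0 : Int) = 1 := by simp
    simp only [pow_zero, Nat.choose_zero_right, Nat.cast_one, one_mul, Nat.cast_zero, sub_zero]
    have hsplit : Finset.sum (Finset.range (j + 1))
        (fun k => (-1 : Int) ^ (k + 1) * (j.choose (k + 1) : Int)
          * PySem.List.pyGetD Y (i - ((k : Int) + 1)) 0)
        = Finset.sum (Finset.range j)
            (fun k => (-1 : Int) ^ (k + 1) * (j.choose (k + 1) : Int)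
              * PySem.List.pyGetD Y (i - ((k : Int) + 1)) 0) := by
      rw [Finset.sum_range_succ]
      simp [Nat.choose_succ_self]
    have hneg : Finset.sum (Finset.range j)
        (fun k => (-1 : Int) ^ (k + 1) * (j.choose (k + 1) : Int)
          * PySem.List.pyGetD Y (i - ((k : Int) + 1)) 0)
        = -Finset.sum (Finset.range j)
            (fun k => (-1 : Int) ^ k * (j.choose (k + 1) : Int)
              * PySem.List.pyGetD Y (i - ((k : Int) + 1)) 0) := by
      rw [← Finset.sum_neg_distrib]
      apply Finset.sum_congr rfl
      intro k _
      ring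
    rw [← hsplit] at hneg
    -- now both sides are sums over range (j+1); finish by ring arithmetic
    linarith [hneg]

-- ---- B-side: the inner fold computes the alternating binomial sum ----

theorem bdtTerm_eq (Y : List Int) (n : Int) (c : Int) (m : Nat) :
    bdtTerm Y n c (m : Int)
      = (-1 : Int) ^ m * c * PySem.List.pyGetD Y (n - 1 - m) 0 := by
  unfold bdtTerm
  rw [show ((2 : Int)) = ((2 : Nat) : Int) by norm_num, PySem.Int.mod_natCast]
  rcases Nat.even_or_odd m with he | ho
  · rw [if_pos (by exact_mod_cast Nat.even_iff.mp he), he.neg_one_pow]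
    ring
  · have h1 : m % 2 = 1 := Nat.odd_iff.mp ho
    rw [if_neg (by simp [h1]), ho.neg_one_pow]
    ring

theorem bdtInner (Y : List Int) (n : Int) (jn : Nat) :
    ∀ m : Nat, m ≤ jn + 1 →
    (PySem.List.pyRange 0 (m : Int) 1).foldl
      (fun (st : Int × Int) k =>
        (st.1 + bdtTerm Y n st.2 k, PySem.Int.floordiv (st.2 * ((jn : Int) - k)) (k + 1)))
      (0, 1)
    = (Finset.sum (Finset.range m)
        (fun k => (-1 : Int) ^ k * (jn.choose k : Int) * PySem.List.pyGetD Y (n - 1 - k) 0),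
       (jn.choose m : Int)) := by
  intro m
  induction m with
  | zero =>
    intro _
    rw [PySem.List.pyRange_one_eq_nil (by norm_num)]
    simp
  | succ m ih =>
    intro hm
    have hmle : m ≤ jn := by omega
    rw [show ((m + 1 : Nat) : Int) = (m : Int) + 1 by push_cast; ring]
    rw [PySem.List.pyRange_one_succ_right (by positivity)]
    rw [List.foldl_append]
    rw [ih (by omega)]
    simp only [List.foldl_cons, List.foldl_nil]
    rw [Prod.mk.injEq]
    refine ⟨?_, ?_⟩
    · rw [Finset.sum_range_succ, bdtTerm_eq]
    · rw [show (jn.choose m : Int) * ((jn : Int) - (m : Int))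
          = ((jn.choose m * (jn - m) : Nat) : Int) by push_cast [Nat.cast_sub hmle]; ring]
      rw [show ((m : Int) + 1) = ((m + 1 : Nat) : Int) by push_cast; ring]
      rw [PySem.Int.floordiv_natCast]
      congr 1
      rw [← Nat.choose_succ_right_eq]
      exact Nat.mul_div_cancel _ (by omega)

-- fold that appends singletons is a map
theorem foldl_append_singleton (f : Int → Int) :
    ∀ (l : List Int) (init : List Int),
      l.foldl (fun out j => out ++ [f j]) init = init ++ l.map f := by
  intro l
  induction l with
  | nil => intro init; simp
  | cons x xs ih => intro init; simp [ih]

theorem bdt_alt_main : ∀ (Y : List Int),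
    backward_diff_table_alt Y
      = (PySem.List.pyRange 0 (Y.length : Int) 1).map
          (fun j => ddI Y j.toNat ((Y.length : Int) - 1)) := by
  intro Y
  unfold backward_diff_table_alt
  simp only []
  rw [foldl_append_singleton
    (fun j => ((PySem.List.pyRange 0 (j + 1) 1).foldl
      (fun (st : Int × Int) k =>
        (st.1 + bdtTerm Y (Y.length : Int) st.2 k,
         PySem.Int.floordiv (st.2 * (j - k)) (k + 1)))
      (0, 1)).1)]
  rw [List.nil_append]
  apply List.map_congr_left
  intro j hj
  rw [PySem.List.mem_pyRange_one] at hj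
  have hj0 : j = ((j.toNat : Nat) : Int) := by omega
  rw [hj0]
  rw [show ((j.toNat : Nat) : Int) + 1 = ((j.toNat + 1 : Nat) : Int) by push_cast; ring]
  rw [bdtInner Y (Y.length : Int) j.toNat (j.toNat + 1) (by omega)]
  simp only [Int.toNat_natCast]
  rw [ddI_eq_sum Y j.toNat ((Y.length : Int) - 1)]

-- ===== VERDICT (by name: the statement is the Claim_ definition above) =====
theorem backward_diff_table_spec : Claim_equal_backward_diff_table := by
  intro Y _
  unfold Spec_backward_diff_table
  rw [bdt_main, bdt_alt_main]
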